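-- pv_equiv track=rewrite | github.com/gschaidergabriel/Project-Frankenstein | writer/coding/syntax_manager.py | _get_indent_string
-- ===== SOURCE A (Python) =====
-- def _get_indent_string(line: str) -> str:
--     """Extract indent string from line"""
--     indent = ""
--     for char in line:
--         if char in (' ', '\t'):
--             indent += char
--         else:
--             break
--     return indent
-- ===== SOURCE B (Python) =====
-- def _get_indent_string(line: str) -> str:
--     """Extract indent string from line"""
--     rest = line.lstrip(' \t')
--     return line[:len(line) - len(rest)]
-- ===== Notes on version B (the rewrite author's own statement) =====
-- stated objective: simpler
-- what changed: Replaces the character-by-character scan-and-append loop with an lstrip on the space/tab set to measure the non-indent tail and a single slice that cuts off the indent.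
import Mathlib
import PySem

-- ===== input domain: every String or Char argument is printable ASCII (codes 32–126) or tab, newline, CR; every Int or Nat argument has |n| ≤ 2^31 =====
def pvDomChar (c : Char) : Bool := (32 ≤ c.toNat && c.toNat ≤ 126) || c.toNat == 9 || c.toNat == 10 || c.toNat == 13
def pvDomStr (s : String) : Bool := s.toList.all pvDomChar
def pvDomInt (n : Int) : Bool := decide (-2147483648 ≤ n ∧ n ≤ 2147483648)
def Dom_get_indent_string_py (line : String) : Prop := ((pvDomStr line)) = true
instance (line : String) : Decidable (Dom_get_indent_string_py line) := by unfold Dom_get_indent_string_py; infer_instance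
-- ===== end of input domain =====

-- B replaces A's char-by-char scan-and-append loop by lstrip(' \t') plus one slice (objective: simpler).

-- ===== PORT A =====
-- A's for-loop with break: structural recursion over the characters, accumulating `indent`.
def get_indent_string_py_loop (indent : String) : List Char → String
  | [] => indent
  | c :: rest =>
    if c = ' ' ∨ c = '\t' then get_indent_string_py_loop (indent.push c) rest
    else indent

def get_indent_string_py (line : String) : String :=
  get_indent_string_py_loop "" line.toList

-- ===== PORT B =====
-- rest = line.lstrip(' \t')  (exact: drops leading chars in {' ','\t'}); then line[:len(line)-len(rest)].
def get_indent_string_py_alt (line : String) : String :=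
  let rest : List Char := line.toList.dropWhile (fun c => c == ' ' || c == '\t')
  String.ofList (PySem.List.slice line.toList none (some ((line.toList.length : Int) - (rest.length : Int))))

-- ===== PRECONDITION & SPEC =====
def Spec_get_indent_string_py (line : String) (out : String) : Prop := out = get_indent_string_py_alt line
instance (line : String) (out : String) : Decidable (Spec_get_indent_string_py line out) := by unfold Spec_get_indent_string_py; infer_instance

-- ===== CLAIM (what is proved, stated in full; the proofs are below) =====
def Claim_equal_get_indent_string_py : Prop := ∀ (line : String), Dom_get_indent_string_py line → Spec_get_indent_string_py line (get_indent_string_py line)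

-- ===== LEMMAS AND PROOFS =====

theorem pv_loop_eq (cs : List Char) (acc : String) :
    get_indent_string_py_loop acc cs = String.ofList (acc.toList ++ cs.takeWhile (fun c => c == ' ' || c == '\t')) := by
  induction cs generalizing acc with
  | nil => simp [get_indent_string_py_loop, String.ofList]
  | cons c rest ih =>
    simp only [get_indent_string_py_loop, List.takeWhile]
    by_cases h : c = ' ' ∨ c = '\t'
    · have hb : (c == ' ' || c == '\t') = true := by
        rcases h with h | h <;> simp [h]
      rw [if_pos h, ih, hb]
      simp
    · have hb : (c == ' ' || c == '\t') = false := by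
        simp only [Bool.or_eq_false_iff, beq_eq_false_iff_ne]
        exact ⟨fun h1 => h (Or.inl h1), fun h2 => h (Or.inr h2)⟩
      rw [if_neg h, hb]
      simp [String.ofList]

theorem pv_take_eq_takeWhile (cs : List Char) (p : Char → Bool) :
    cs.take (cs.length - (cs.dropWhile p).length) = cs.takeWhile p := by
  have hlen : (cs.takeWhile p).length + (cs.dropWhile p).length = cs.length := by
    conv_rhs => rw [← List.takeWhile_append_dropWhile (p := p) (l := cs)]
    rw [List.length_append]
  have h1 : cs.length - (cs.dropWhile p).length = (cs.takeWhile p).length := by omega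
  rw [h1]
  nth_rewrite 2 [← List.takeWhile_append_dropWhile (p := p) (l := cs)]
  exact List.take_left

-- ===== VERDICT (by name: the statement is the Claim_ definition above) =====
theorem get_indent_string_py_spec : Claim_equal_get_indent_string_py := by
  intro line _
  unfold Spec_get_indent_string_py get_indent_string_py get_indent_string_py_alt
  have hle : (line.toList.dropWhile (fun c => c == ' ' || c == '\t')).length ≤ line.toList.length :=
    List.length_dropWhile_le _ _
  have hcast : ((line.toList.length : Int) - ((line.toList.dropWhile (fun c => c == ' ' || c == '\t')).length : Int))
      = ((line.toList.length - (line.toList.dropWhile (fun c => c == ' ' || c == '\t')).length : Nat) : Int) := by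
    omega
  rw [pv_loop_eq]
  simp only [hcast, PySem.List.slice_to_natCast]
  rw [pv_take_eq_takeWhile]
  simp
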